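-- pv_equiv track=rewrite | github.com/913-guia-alex/UBB_Projects | Year3/Sem1/LimbajeFormaleSiTehniciDeCompilare/Lab23LFTC/CryptoA3.py | num_to_letters_de
-- ===== SOURCE A (Python) =====
-- def num_to_letters_de(num):
--     letters = ''
--     while num > 0:
--         num, remainder = divmod(num, 27)
--         if remainder == 0:
--             letters = '_' + letters
--         else:
--             letters = chr(64 + remainder) + letters
--     return letters.rjust(2, '_')
-- ===== SOURCE B (Python) =====
-- def num_to_letters_de(num):
--     if num <= 0:
--         return '__'
--     p = 1
--     while 27 * p <= num:
--         p *= 27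
--     s = ''
--     while p >= 1:
--         d = (num // p) % 27
--         s += '_' if d == 0 else chr(64 + d)
--         p //= 27
--     return '_' + s if len(s) < 2 else s
-- ===== Notes on version B (the rewrite author's own statement) =====
-- stated objective: alternative
-- what changed: Instead of A's LSB-first while loop that prepends each divmod remainder to an accumulator, B first scales a power variable up to the largest base power not exceeding num and then emits digits most-significant-first by dividing num by descending powers and taking the remainder, appending to the string.
import Mathlib
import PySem

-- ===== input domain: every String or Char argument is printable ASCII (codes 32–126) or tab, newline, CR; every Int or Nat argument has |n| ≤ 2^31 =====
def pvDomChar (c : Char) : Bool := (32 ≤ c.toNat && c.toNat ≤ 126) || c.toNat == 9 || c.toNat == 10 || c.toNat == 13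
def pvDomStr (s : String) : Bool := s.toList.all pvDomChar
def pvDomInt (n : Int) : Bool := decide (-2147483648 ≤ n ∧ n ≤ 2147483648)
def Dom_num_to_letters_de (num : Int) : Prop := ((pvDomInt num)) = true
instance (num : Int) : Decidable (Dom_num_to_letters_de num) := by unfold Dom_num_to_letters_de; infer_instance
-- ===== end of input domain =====

-- B extracts base-27 digits most-significant-first by first finding the highest power of 27 ≤ num and
-- then indexing digits with (num // p) % 27, instead of A's LSB-first prepend loop; no speed claim.

-- ===== PORT A =====
-- str.rjust(2, '_'): pad on the left with '_' up to width 2 (exact for this fixed width/fill)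
def pvRjust2 (l : List Char) : List Char := List.replicate (2 - l.length) '_' ++ l

-- the while loop: state is (num, letters); digits are prepended
def pvLoopA (num : Int) (letters : List Char) : List Char :=
  if h : 0 < num then
    let q := PySem.Int.floordiv num 27
    let r := PySem.Int.mod num 27
    pvLoopA q ((if r = 0 then '_' else Char.ofNat (64 + r).toNat) :: letters)
  else letters
termination_by num.toNat
decreasing_by
  have _h1 : 0 ≤ PySem.Int.floordiv num 27 := (PySem.Int.le_floordiv_iff_mul_le (by omega)).mpr (by omega)
  have h2 : PySem.Int.floordiv num 27 < num := (PySem.Int.floordiv_lt_iff_lt_mul (by omega)).mpr (by omega)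
  omega

def num_to_letters_de (num : Int) : String := String.ofList (pvRjust2 (pvLoopA num []))

-- ===== PORT B =====
-- first while loop: grow p to the largest power of 27 with 27*p ≤ num
-- (the '1 ≤ p' conjunct only makes the recursion total; the wrapper always starts at p = 1)
def pvFindP (num p : Int) : Int :=
  if _h : 1 ≤ p ∧ 27 * p ≤ num then pvFindP num (27 * p) else p
termination_by (num + 1 - p).toNat
decreasing_by omega

-- second while loop: emit digit (num // p) % 27 for p, p//27, …, 1, appending to s
def pvLoop2 (num p : Int) (s : List Char) : List Char :=
  if _h : 1 ≤ p then
    let d := PySem.Int.mod (PySem.Int.floordiv num p) 27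
    pvLoop2 num (PySem.Int.floordiv p 27)
      (s ++ [if d = 0 then '_' else Char.ofNat (64 + d).toNat])
  else s
termination_by p.toNat
decreasing_by
  have _h1 : 0 ≤ PySem.Int.floordiv p 27 := (PySem.Int.le_floordiv_iff_mul_le (by omega)).mpr (by omega)
  have h2 : PySem.Int.floordiv p 27 < p := (PySem.Int.floordiv_lt_iff_lt_mul (by omega)).mpr (by omega)
  omega

def num_to_letters_de_alt (num : Int) : String :=
  if num ≤ 0 then "__"
  else
    let s := pvLoop2 num (pvFindP num 1) []
    String.ofList (if s.length < 2 then '_' :: s else s)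

-- ===== PRECONDITION & SPEC =====
def Spec_num_to_letters_de (num : Int) (out : String) : Prop := out = num_to_letters_de_alt num
instance (num : Int) (out : String) : Decidable (Spec_num_to_letters_de num out) := by unfold Spec_num_to_letters_de; infer_instance

-- ===== CLAIM =====
def Claim_equal_num_to_letters_de : Prop := ∀ (num : Int), Dom_num_to_letters_de num → Spec_num_to_letters_de num (num_to_letters_de num)

-- ===== LEMMAS AND PROOFS =====
-- the MSB-first digit string of n (empty for n ≤ 0), the common reference point of both ports
def pvDigits (n : Int) : List Char :=
  if _h : n ≤ 0 then []
  else
    let r := PySem.Int.mod n 27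
    pvDigits (PySem.Int.floordiv n 27) ++ [if r = 0 then '_' else Char.ofNat (64 + r).toNat]
termination_by n.toNat
decreasing_by
  have _h1 : 0 ≤ PySem.Int.floordiv n 27 := (PySem.Int.le_floordiv_iff_mul_le (by omega)).mpr (by omega)
  have h2 : PySem.Int.floordiv n 27 < n := (PySem.Int.floordiv_lt_iff_lt_mul (by omega)).mpr (by omega)
  omega

-- A's loop invariant: the accumulator ends up behind the digit string
lemma pvLoopA_eq_pvDigits (num : Int) (acc : List Char) : pvLoopA num acc = pvDigits num ++ acc := by
  by_cases h : 0 < num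
  · rw [pvLoopA, pvDigits, dif_pos h, dif_neg (by omega), pvLoopA_eq_pvDigits]
    simp
  · rw [pvLoopA, pvDigits, dif_neg h, dif_pos (by omega)]
    simp
termination_by num.toNat
decreasing_by
  have _h1 : 0 ≤ PySem.Int.floordiv num 27 := (PySem.Int.le_floordiv_iff_mul_le (by omega)).mpr (by omega)
  have h2 : PySem.Int.floordiv num 27 < num := (PySem.Int.floordiv_lt_iff_lt_mul (by omega)).mpr (by omega)
  omega

-- the j+1 digits of n at powers 27^j … 27^0, MSB first (proof-side reference for B's second loop)
def pvC : Nat → Int → List Char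
  | 0, n => [if n % 27 = 0 then '_' else Char.ofNat (64 + n % 27).toNat]
  | j + 1, n =>
      (if (n / 27 ^ (j + 1)) % 27 = 0 then '_'
       else Char.ofNat (64 + (n / 27 ^ (j + 1)) % 27).toNat) :: pvC j n

lemma pvFloordiv_pos (a b : Int) (hb : 0 < b) : PySem.Int.floordiv a b = a / b :=
  PySem.Int.floordiv_eq_ediv_of_pos hb

lemma pvMod_pos (a b : Int) (hb : 0 < b) : PySem.Int.mod a b = a % b :=
  PySem.Int.mod_eq_emod_of_pos hb

-- B's second loop, started at p = 27^j, appends exactly pvC j num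
lemma pvLoop2_eq_pvC (j : Nat) (num : Int) (s : List Char) :
    pvLoop2 num (27 ^ j) s = s ++ pvC j num := by
  induction j generalizing s with
  | zero =>
      rw [pvLoop2, dif_pos (by norm_num)]
      rw [pvLoop2]
      have h1 : PySem.Int.floordiv num ((27:Int) ^ 0) = num := by
        rw [pvFloordiv_pos _ _ (by norm_num)]; simp
      have h2 : PySem.Int.floordiv ((27:Int) ^ 0) 27 = 0 := by
        rw [pvFloordiv_pos _ _ (by norm_num)]; norm_num
      rw [dif_neg (by rw [h2]; norm_num)]
      simp only [h1, pvMod_pos _ _ (by norm_num : (0:Int) < 27), pvC]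
  | succ j ih =>
      rw [pvLoop2, dif_pos (one_le_pow₀ (by norm_num : (1:Int) ≤ 27))]
      have h2 : PySem.Int.floordiv ((27:Int) ^ (j + 1)) 27 = 27 ^ j := by
        rw [pvFloordiv_pos _ _ (by norm_num), pow_succ]
        exact Int.mul_ediv_cancel _ (by norm_num)
      rw [h2, ih]
      simp only [pvFloordiv_pos _ _ (by positivity : (0:Int) < 27 ^ (j+1)),
        pvMod_pos _ _ (by norm_num : (0:Int) < 27), pvC, List.append_assoc,
        List.singleton_append]

-- shifting: the j+2 digits of n are the j+1 digits of n/27 followed by the last digit of n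
lemma pvC_shift (j : Nat) (n : Int) :
    pvC (j + 1) n = pvC j (n / 27) ++ [if n % 27 = 0 then '_' else Char.ofNat (64 + n % 27).toNat] := by
  induction j generalizing n with
  | zero => simp [pvC]
  | succ j ih =>
      have hd : n / 27 / 27 ^ (j + 1) = n / 27 ^ (j + 1 + 1) := by
        rw [Int.ediv_ediv_of_nonneg (by norm_num : (0:Int) ≤ 27), ← pow_succ']
      calc pvC (j + 1 + 1) n
          = (if (n / 27 ^ (j + 1 + 1)) % 27 = 0 then '_'
             else Char.ofNat (64 + (n / 27 ^ (j + 1 + 1)) % 27).toNat) :: pvC (j + 1) n := rfl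
        _ = _ := by rw [ih, pvC, hd]; simp

-- with the right number of digits, pvC is exactly pvDigits
lemma pvC_eq_pvDigits (j : Nat) (n : Int) (hlo : 27 ^ j ≤ n) (hhi : n < 27 ^ (j + 1)) :
    pvC j n = pvDigits n := by
  induction j generalizing n with
  | zero =>
      have hn : (1:Int) ≤ n := by simpa using hlo
      have hlt : n < 27 := by simpa using hhi
      have hm : n % 27 = n := Int.emod_eq_of_lt (by omega) hlt
      rw [pvDigits, dif_neg (by omega)]
      have h0 : PySem.Int.floordiv n 27 = 0 := by
        rw [pvFloordiv_pos _ _ (by norm_num)]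
        exact Int.ediv_eq_zero_of_lt (by omega) hlt
      rw [h0, pvDigits, dif_pos le_rfl, List.nil_append,
        pvMod_pos _ _ (by norm_num : (0:Int) < 27), hm]
      simp only [pvC, hm]
  | succ j ih =>
      have hn : 0 < n := lt_of_lt_of_le (by positivity) hlo
      rw [pvC_shift]
      have hq1 : 27 ^ j ≤ n / 27 := by rw [pow_succ] at hlo; omega
      have hq2 : n / 27 < 27 ^ (j + 1) := by rw [pow_succ 27 (j+1)] at hhi; omega
      rw [ih _ hq1 hq2]
      conv_rhs => rw [pvDigits, dif_neg (by omega)]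
      rw [pvFloordiv_pos _ _ (by norm_num : (0:Int) < 27),
        pvMod_pos _ _ (by norm_num : (0:Int) < 27)]

-- B's first loop: from 1 ≤ p ≤ num it reaches the largest power-multiple p·27^j still ≤ num
lemma pvFindP_spec (num p : Int) (hp : 1 ≤ p) (hpn : p ≤ num) :
    ∃ j : Nat, pvFindP num p = p * 27 ^ j ∧ p * 27 ^ j ≤ num ∧ num < p * 27 ^ (j + 1) := by
  by_cases h : 27 * p ≤ num
  · obtain ⟨j, hj, hlo, hhi⟩ := pvFindP_spec num (27 * p) (by omega) h
    refine ⟨j + 1, ?_, ?_, ?_⟩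
    · rw [pvFindP, dif_pos ⟨hp, h⟩, hj]; ring
    · calc p * 27 ^ (j + 1) = 27 * p * 27 ^ j := by ring
        _ ≤ num := hlo
    · calc num < 27 * p * 27 ^ (j + 1) := hhi
        _ = p * 27 ^ (j + 1 + 1) := by ring
  · exact ⟨0, by rw [pvFindP, dif_neg (by omega)]; ring, by simpa using hpn,
      by rw [pow_one]; omega⟩
termination_by (num + 1 - p).toNat
decreasing_by omega

lemma pvDigits_ne_nil (n : Int) (hn : 0 < n) : pvDigits n ≠ [] := by
  rw [pvDigits, dif_neg (by omega)]
  simp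

-- ===== VERDICT =====
theorem num_to_letters_de_spec : Claim_equal_num_to_letters_de := by
  intro num _
  unfold Spec_num_to_letters_de num_to_letters_de num_to_letters_de_alt
  by_cases h : num ≤ 0
  · rw [if_pos h, pvLoopA, dif_neg (by omega)]
    rfl
  · rw [if_neg h]
    obtain ⟨j, hj, hlo, hhi⟩ := pvFindP_spec num 1 le_rfl (by omega)
    simp only [one_mul] at hj hlo hhi
    rw [hj, pvLoop2_eq_pvC, List.nil_append, pvC_eq_pvDigits j num hlo hhi,
      pvLoopA_eq_pvDigits, List.append_nil]
    have hne := pvDigits_ne_nil num (by omega)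
    match hd : pvDigits num with
    | [] => exact absurd hd hne
    | [a] => simp [pvRjust2]
    | a :: b :: t => simp [pvRjust2]
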